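-- pv_equiv track=rewrite | github.com/justdataplease/justfunctions-bigquery | bigquery/deploy.py | process_documentation
-- ===== SOURCE A (Python) =====
-- def process_documentation(documentation, doc_columns):
--     """
--     Keep only specific columns for documentation
--     :param documentation:
--     :param doc_columns:
--     :return:
--     """
--     if not doc_columns:
--         doc_columns = ['title', 'slug', 'ftype', 'source', 'tutorial', 'tags', 'github', 'region',
--                        'description',
--                        'statement', 'example_query', 'example_output', 'example_overview']
--     res = [dict((k, doc.get(k)) for k in doc_columns
--                 if k in doc) for doc in documentation]
--     return res
-- ===== SOURCE B (Python) =====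
-- _DEFAULT_COLUMNS = ['title', 'slug', 'ftype', 'source', 'tutorial', 'tags', 'github', 'region',
--                     'description',
--                     'statement', 'example_query', 'example_output', 'example_overview']
--
--
-- def process_documentation(documentation, doc_columns):
--     """Keep only specific columns for documentation."""
--     # index each wanted column by its first position
--     pos = {}
--     for i, k in enumerate(doc_columns if doc_columns else _DEFAULT_COLUMNS):
--         pos.setdefault(k, i)
--     # filter each doc's own items by the index, then restore column order by sorting
--     return [dict(sorted(((k, v) for k, v in doc.items() if k in pos),
--                         key=lambda kv: pos[kv[0]]))
--             for doc in documentation]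
-- ===== Notes on version B (the rewrite author's own statement) =====
-- stated objective: alternative
-- what changed: Instead of A's per-doc scan over the whole column list (membership test and lookup per column), B builds a first-occurrence position index over the columns once, filters each doc's own items by that index, and sorts the kept items by column position to restore A's key order.
import Mathlib
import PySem

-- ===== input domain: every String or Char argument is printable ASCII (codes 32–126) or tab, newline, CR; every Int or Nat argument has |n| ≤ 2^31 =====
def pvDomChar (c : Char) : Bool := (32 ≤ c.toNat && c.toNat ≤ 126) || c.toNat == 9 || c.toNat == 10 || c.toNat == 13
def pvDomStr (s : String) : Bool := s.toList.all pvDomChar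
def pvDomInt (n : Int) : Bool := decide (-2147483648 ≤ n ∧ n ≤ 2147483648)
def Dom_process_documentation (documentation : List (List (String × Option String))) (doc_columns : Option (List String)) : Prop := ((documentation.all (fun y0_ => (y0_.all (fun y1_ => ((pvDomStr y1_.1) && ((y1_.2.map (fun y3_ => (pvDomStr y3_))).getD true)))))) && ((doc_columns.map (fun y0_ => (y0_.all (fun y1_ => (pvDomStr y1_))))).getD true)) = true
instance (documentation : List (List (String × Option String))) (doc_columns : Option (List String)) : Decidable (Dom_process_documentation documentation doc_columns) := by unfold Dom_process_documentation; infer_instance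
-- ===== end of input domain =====

-- B precomputes a first-occurrence position index over the columns, filters each doc's own
-- items by that index and sorts them by column position, instead of A's per-doc scan over the
-- column list (alternative; equal return values, key order included).


-- the module-level default column list
def pvDefaultColumns : List String :=
  ["title", "slug", "ftype", "source", "tutorial", "tags", "github", "region",
   "description",
   "statement", "example_query", "example_output", "example_overview"]

-- ===== PORT A =====
-- dict((k, doc.get(k)) for k in doc_columns if k in doc), built left to right
def pvRowA (doc_columns : List String) (doc : List (String × Option String)) :
    List (String × Option String) :=
  (doc_columns.foldl
    (fun d k =>
      if (PySem.Dict.mk doc).contains k then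
        d.insert k ((PySem.Dict.get? (PySem.Dict.mk doc) k).getD none)
      else d)
    PySem.Dict.empty).items

def process_documentation (documentation : List (List (String × Option String))) (doc_columns : Option (List String)) : List (List (String × Option String)) :=
  -- 'if not doc_columns': None or [] falls back to the default list
  let cols := match doc_columns with
    | none => pvDefaultColumns
    | some [] => pvDefaultColumns
    | some l => l
  documentation.map (fun doc => pvRowA cols doc)

-- ===== PORT B =====
-- pos = {}; for i, k in enumerate(cols): pos.setdefault(k, i)
def pvPos (cols : List String) : PySem.Dict String Int :=
  (PySem.List.enumerate cols).foldl (fun d p => d.setdefault p.2 p.1) PySem.Dict.empty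

-- dict(sorted(((k, v) for k, v in doc.items() if k in pos), key=lambda kv: pos[kv[0]]))
-- key lookup pos[kv[0]] is ported as get?...getD 0: exact, since every kept key is a key of pos
def pvRowB (pos : PySem.Dict String Int) (doc : List (String × Option String)) :
    List (String × Option String) :=
  (PySem.Dict.ofList
    (PySem.List.sorted (doc.filter (fun kv => pos.contains kv.1))
      (fun kv => (pos.get? kv.1).getD 0))).items

def process_documentation_alt (documentation : List (List (String × Option String))) (doc_columns : Option (List String)) : List (List (String × Option String)) :=
  -- 'doc_columns if doc_columns else _DEFAULT_COLUMNS' (truthiness: None or [] is falsy)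
  let cols := if (doc_columns.getD []).isEmpty then pvDefaultColumns else doc_columns.getD []
  let pos := pvPos cols
  documentation.map (fun doc => pvRowB pos doc)

-- ===== PRECONDITION & SPEC =====
-- Pre_ excludes association lists that give one doc two entries with the same key: such a list
-- does not represent any Python dict (dict keys are unique), so Python A can never receive it.
def Pre_process_documentation (documentation : List (List (String × Option String))) (doc_columns : Option (List String)) : Prop :=
  ∀ doc ∈ documentation, (doc.map Prod.fst).Nodup
instance (documentation : List (List (String × Option String))) (doc_columns : Option (List String)) : Decidable (Pre_process_documentation documentation doc_columns) := by unfold Pre_process_documentation; infer_instance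

def pvWitness_process_documentation : (List (List (String × Option String))) × Option (List String) :=
  ([[("title", some "x"), ("slug", none)], []], some ["slug", "title"])

def Spec_process_documentation (documentation : List (List (String × Option String))) (doc_columns : Option (List String)) (out : List (List (String × Option String))) : Prop := out = process_documentation_alt documentation doc_columns
instance (documentation : List (List (String × Option String))) (doc_columns : Option (List String)) (out : List (List (String × Option String))) : Decidable (Spec_process_documentation documentation doc_columns out) := by unfold Spec_process_documentation; infer_instance

-- ===== CLAIM (what is proved, stated in full; the proofs are below) =====
def Claim_equal_process_documentation : Prop := ∀ (documentation : List (List (String × Option String))) (doc_columns : Option (List String)), Dom_process_documentation documentation doc_columns → Pre_process_documentation documentation doc_columns → Spec_process_documentation documentation doc_columns (process_documentation documentation doc_columns)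

-- ===== LEMMAS AND PROOFS =====

-- A's guarded fold = plain insert fold over the filtered column list
theorem pvFoldA_filter (c : String → Bool) (g : String → Option String) :
    ∀ (ks : List String) (acc : PySem.Dict String (Option String)),
      ks.foldl (fun a k => if c k then a.insert k (g k) else a) acc
      = (ks.filter c).foldl (fun a k => a.insert k (g k)) acc := by
  intro ks
  induction ks with
  | nil => intro acc; rfl
  | cons k t ih =>
    intro acc
    cases hc : c k <;> simp [hc, ih]

-- a dict whose items are s.map (k ↦ (k, g k)) answers contains like membership in s
theorem pvContains_map (g : String → Option String) (s : List String) (k : String) :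
    (PySem.Dict.mk (s.map (fun k => (k, g k)))).contains k = decide (k ∈ s) := by
  induction s with
  | nil => rfl
  | cons a t ih =>
    simp only [PySem.Dict.contains, List.map_cons, List.any_cons] at ih ⊢
    rw [ih]
    by_cases hak : k = a
    · subst hak; simp
    · simp [hak, Ne.symm hak]

-- inserting (k, g k) pairs is the ordered-set fold on the keys
theorem pvFoldInsert_set (g : String → Option String) :
    ∀ (ks : List String) (s : List String),
      (ks.foldl (fun (a : PySem.Dict String (Option String)) k => a.insert k (g k))
        (PySem.Dict.mk (s.map (fun k => (k, g k))))).items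
      = (ks.foldl PySem.Set.add s).map (fun k => (k, g k)) := by
  intro ks
  induction ks with
  | nil => intro s; rfl
  | cons k t ih =>
    intro s
    have hstep : (PySem.Dict.mk (s.map (fun k => (k, g k)))).insert k (g k)
        = PySem.Dict.mk ((PySem.Set.add s k).map (fun k => (k, g k))) := by
      apply PySem.Dict.ext
      rw [PySem.Dict.items_insert, pvContains_map]
      by_cases hc : k ∈ s
      · rw [PySem.Set.add_of_mem hc, decide_eq_true hc]
        simp only [if_pos rfl, List.map_map]
        apply List.map_congr_left
        intro a _
        by_cases hak : a = k
        · subst hak; simp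
        · simp [Function.comp, hak]
      · rw [PySem.Set.add_of_not_mem hc]
        simp [hc]
    simp only [List.foldl_cons, hstep, ih]

theorem pvIdxOf_append_self {α : Type} [BEq α] [LawfulBEq α] (xs : List α) (x : α) (h : x ∉ xs) :
    (xs ++ [x]).idxOf x = xs.length := by
  induction xs with
  | nil => simp
  | cons y ys ih =>
    simp only [List.mem_cons, not_or] at h
    rw [List.cons_append, List.idxOf_cons_ne _ (Ne.symm h.1), ih h.2]
    simp

-- dedup lists its elements in order of first occurrence
theorem pvDedup_pairwise_idxOf (xs : List String) :
    (PySem.List.dedup xs).Pairwise (fun a b => xs.idxOf a < xs.idxOf b) := by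
  induction xs using List.reverseRecOn with
  | nil => simp [PySem.List.dedup, PySem.Set.ofList]
  | append_singleton xs x ih =>
    rw [PySem.List.dedup_eq_ofList] at ih ⊢
    rw [PySem.Set.ofList_append_singleton]
    by_cases hx : x ∈ xs
    · rw [PySem.Set.add_of_mem ((PySem.Set.mem_ofList xs x).mpr hx)]
      refine ih.imp_of_mem (fun {a b} ha hb h => ?_)
      rw [List.idxOf_append_of_mem ((PySem.Set.mem_ofList xs a).mp ha),
        List.idxOf_append_of_mem ((PySem.Set.mem_ofList xs b).mp hb)]
      exact h
    · rw [PySem.Set.add_of_not_mem (fun h => hx ((PySem.Set.mem_ofList xs x).mp h))]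
      rw [List.pairwise_append]
      refine ⟨ih.imp_of_mem (fun {a b} ha hb h => ?_), List.pairwise_singleton _ _, ?_⟩
      · rw [List.idxOf_append_of_mem ((PySem.Set.mem_ofList xs a).mp ha),
          List.idxOf_append_of_mem ((PySem.Set.mem_ofList xs b).mp hb)]
        exact h
      · intro a ha b hb
        simp only [List.mem_singleton] at hb
        subst hb
        have ham : a ∈ xs := (PySem.Set.mem_ofList xs a).mp ha
        rw [List.idxOf_append_of_mem ham, pvIdxOf_append_self xs b hx]
        exact List.idxOf_lt_length_of_mem ham

-- dedup of a filtered list is a sublist of dedup of the list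
theorem pvDedup_filter_sublist (c : String → Bool) (xs : List String) :
    (PySem.List.dedup (xs.filter c)).Sublist (PySem.List.dedup xs) := by
  induction xs using List.reverseRecOn with
  | nil => simp
  | append_singleton xs x ih =>
    simp only [PySem.List.dedup_eq_ofList] at ih ⊢
    rw [List.filter_append, PySem.Set.ofList_append_singleton]
    cases hcx : c x with
    | false =>
      simp only [List.filter_cons, hcx, Bool.false_eq_true, if_neg, List.filter_nil,
        List.append_nil, not_false_eq_true]
      by_cases hx : x ∈ PySem.Set.ofList xs
      · rw [PySem.Set.add_of_mem hx]; exact ih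
      · rw [PySem.Set.add_of_not_mem hx]
        exact ih.trans (List.sublist_append_left _ _)
    | true =>
      simp only [List.filter_cons, hcx, if_true, List.filter_nil]
      rw [PySem.Set.ofList_append_singleton]
      by_cases hx : x ∈ xs
      · rw [PySem.Set.add_of_mem ((PySem.Set.mem_ofList xs x).mpr hx),
          PySem.Set.add_of_mem ((PySem.Set.mem_ofList _ x).mpr (List.mem_filter.mpr ⟨hx, hcx⟩))]
        exact ih
      · rw [PySem.Set.add_of_not_mem (fun h => hx ((PySem.Set.mem_ofList xs x).mp h)),
          PySem.Set.add_of_not_mem (fun h =>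
            hx (List.mem_of_mem_filter ((PySem.Set.mem_ofList _ x).mp h)))]
        exact ih.append (List.Sublist.refl _)

-- the setdefault fold over enumerate builds the first-occurrence index
theorem pvPos_fold (k : String) :
    ∀ (l : List String) (i : Int) (acc : PySem.Dict String Int),
      ((PySem.List.enumerate l i).foldl (fun d p => d.setdefault p.2 p.1) acc).get? k
      = if acc.contains k then acc.get? k
        else if k ∈ l then some (i + (l.idxOf k : Int)) else none := by
  intro l
  induction l with
  | nil =>
    intro i acc
    cases hc : acc.contains k with
    | true => simp [PySem.List.enumerate]
    | false =>
      simp only [PySem.List.enumerate, List.foldl_nil, hc, Bool.false_eq_true, if_neg,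
        List.not_mem_nil, not_false_eq_true]
      exact (PySem.Dict.get?_eq_none_iff_contains _ _).mpr hc
  | cons x t ih =>
    intro i acc
    have henum : PySem.List.enumerate (x :: t) i = (i, x) :: PySem.List.enumerate t (i + 1) := by
      simp [PySem.List.enumerate]
    rw [henum, List.foldl_cons, ih]
    by_cases hk : k = x
    · subst hk
      cases hacc : acc.contains k with
      | true =>
        rw [PySem.Dict.setdefault_of_contains acc i hacc]
        simp [hacc]
      | false =>
        rw [PySem.Dict.setdefault_of_not_contains acc i hacc]
        simp [PySem.Dict.contains_insert, PySem.Dict.get?_insert_self, hacc]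
    · have h1 : (acc.setdefault x i).contains k = acc.contains k := by
        cases hacc : acc.contains x with
        | true => rw [PySem.Dict.setdefault_of_contains acc i hacc]
        | false =>
          rw [PySem.Dict.setdefault_of_not_contains acc i hacc,
            PySem.Dict.contains_insert]
          simp [hk]
      have h2 : (acc.setdefault x i).get? k = acc.get? k := by
        cases hacc : acc.contains x with
        | true => rw [PySem.Dict.setdefault_of_contains acc i hacc]
        | false =>
          rw [PySem.Dict.setdefault_of_not_contains acc i hacc,
            PySem.Dict.get?_insert_of_ne acc i hk]
      rw [h1, h2]
      cases hac : acc.contains k with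
      | true => simp
      | false =>
        simp only [Bool.false_eq_true, if_neg, not_false_eq_true]
        by_cases hm : k ∈ t
        · simp only [List.mem_cons, hm, or_true, hk,
            List.idxOf_cons_ne t (Ne.symm hk), Nat.succ_eq_add_one]
          push_cast
          ring
        · simp [hk, hm]

theorem pvPos_get?_of_mem (cols : List String) (k : String) (h : k ∈ cols) :
    (pvPos cols).get? k = some ((cols.idxOf k : Int)) := by
  unfold pvPos
  rw [pvPos_fold]
  simp [h]

theorem pvPos_contains (cols : List String) (k : String) :
    (pvPos cols).contains k = decide (k ∈ cols) := by
  rw [PySem.Dict.contains_eq_isSome_get?]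
  unfold pvPos
  rw [pvPos_fold]
  by_cases h : k ∈ cols <;> simp [h]

-- the per-doc rows agree
theorem pvRow_eq (cols : List String) (doc : List (String × Option String))
    (hnd : (doc.map Prod.fst).Nodup) :
    pvRowA cols doc = pvRowB (pvPos cols) doc := by
  have hA : pvRowA cols doc
      = (PySem.List.dedup (cols.filter (fun k => (PySem.Dict.mk doc).contains k))).map
          (fun k => (k, ((PySem.Dict.mk doc).get? k).getD none)) := by
    unfold pvRowA
    rw [pvFoldA_filter (fun k => (PySem.Dict.mk doc).contains k)
        (fun k => ((PySem.Dict.mk doc).get? k).getD none)]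
    have h0 : (PySem.Dict.empty : PySem.Dict String (Option String))
        = PySem.Dict.mk (([] : List String).map
            (fun k => (k, ((PySem.Dict.mk doc).get? k).getD none))) := rfl
    rw [h0, pvFoldInsert_set]
    rw [PySem.List.dedup_eq_ofList]
    rfl
  have hDmem : ∀ k, k ∈ PySem.List.dedup (cols.filter (fun k => (PySem.Dict.mk doc).contains k))
      ↔ k ∈ cols ∧ (PySem.Dict.mk doc).contains k = true := by
    intro k; rw [PySem.List.mem_dedup, List.mem_filter]
  have hkeysnd : (PySem.Dict.mk doc).keys.Nodup := hnd
  have hmemdoc : ∀ (k : String) (v : Option String),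
      (PySem.Dict.mk doc).get? k = some v ↔ (k, v) ∈ doc :=
    fun k v => PySem.Dict.get?_eq_some_iff_mem_items _ k v hkeysnd
  have hB : pvRowB (pvPos cols) doc
      = (PySem.List.dedup (cols.filter (fun k => (PySem.Dict.mk doc).contains k))).map
          (fun k => (k, ((PySem.Dict.mk doc).get? k).getD none)) := by
    unfold pvRowB
    have hfil : doc.filter (fun kv => (pvPos cols).contains kv.1)
        = doc.filter (fun kv => decide (kv.1 ∈ cols)) :=
      List.filter_congr (fun kv _ => by rw [pvPos_contains])
    rw [hfil]
    have hRnodup : ((PySem.List.dedup (cols.filter (fun k => (PySem.Dict.mk doc).contains k))).map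
        (fun k => (k, ((PySem.Dict.mk doc).get? k).getD none))).Nodup :=
      List.Nodup.map (fun a b h => congrArg Prod.fst h) (PySem.List.nodup_dedup _)
    have hdocnd : doc.Nodup := hnd.of_map
    have hkeptnodup : (doc.filter (fun kv => decide (kv.1 ∈ cols))).Nodup := hdocnd.filter _
    have hperm : (((PySem.List.dedup (cols.filter (fun k => (PySem.Dict.mk doc).contains k))).map
        (fun k => (k, ((PySem.Dict.mk doc).get? k).getD none)))).Perm
        (doc.filter (fun kv => decide (kv.1 ∈ cols))) := by
      rw [List.perm_ext_iff_of_nodup hRnodup hkeptnodup]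
      rintro ⟨k, v⟩
      simp only [List.mem_map, List.mem_filter, decide_eq_true_eq]
      constructor
      · rintro ⟨a, ha, hfa⟩
        have hk : a = k := congrArg Prod.fst hfa
        subst hk
        obtain ⟨hcols, hcont⟩ := (hDmem a).mp ha
        have hex : ∃ w, (PySem.Dict.mk doc).get? a = some w := by
          rw [PySem.Dict.contains_eq_isSome_get?] at hcont
          exact Option.isSome_iff_exists.mp hcont
        obtain ⟨w, hw⟩ := hex
        have hv : v = w := by
          have h2 := congrArg Prod.snd hfa
          simp only [hw] at h2
          simpa using h2.symm
        rw [hv]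
        exact ⟨(hmemdoc a w).mp hw, hcols⟩
      · rintro ⟨hmem, hcols⟩
        have hw : (PySem.Dict.mk doc).get? k = some v := (hmemdoc k v).mpr hmem
        refine ⟨k, (hDmem k).mpr ⟨hcols, ?_⟩, ?_⟩
        · rw [PySem.Dict.contains_eq_isSome_get?, hw]; rfl
        · simp [hw]
    have hpair : (((PySem.List.dedup (cols.filter (fun k => (PySem.Dict.mk doc).contains k))).map
        (fun k => (k, ((PySem.Dict.mk doc).get? k).getD none)))).Pairwise
        (fun a b => ((pvPos cols).get? a.1).getD 0 < ((pvPos cols).get? b.1).getD 0) := by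
      rw [List.pairwise_map]
      have hsub := pvDedup_filter_sublist (fun k => (PySem.Dict.mk doc).contains k) cols
      have hbase := List.Pairwise.sublist hsub (pvDedup_pairwise_idxOf cols)
      refine hbase.imp_of_mem (fun {a b} ha hb hlt => ?_)
      have ha' : a ∈ cols := ((hDmem a).mp ha).1
      have hb' : b ∈ cols := ((hDmem b).mp hb).1
      simp only [pvPos_get?_of_mem cols a ha', pvPos_get?_of_mem cols b hb', Option.getD_some]
      exact_mod_cast hlt
    have hsorted := PySem.List.sorted_eq_of_perm_of_pairwise_lt
      (doc.filter (fun kv => decide (kv.1 ∈ cols)))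
      ((PySem.List.dedup (cols.filter (fun k => (PySem.Dict.mk doc).contains k))).map
        (fun k => (k, ((PySem.Dict.mk doc).get? k).getD none)))
      (fun kv => ((pvPos cols).get? kv.1).getD 0) hperm hpair
    rw [hsorted]
    have hfresh : ∀ a ∈ ((PySem.List.dedup (cols.filter (fun k => (PySem.Dict.mk doc).contains k))).map
        (fun k => (k, ((PySem.Dict.mk doc).get? k).getD none))),
        (PySem.Dict.empty : PySem.Dict String (Option String)).contains a.1 = false :=
      fun a _ => rfl
    have hkeys2 : (((PySem.List.dedup (cols.filter (fun k => (PySem.Dict.mk doc).contains k))).map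
        (fun k => (k, ((PySem.Dict.mk doc).get? k).getD none))).map Prod.fst).Nodup := by
      rw [List.map_map]
      have hid : (Prod.fst ∘ fun k => (k, ((PySem.Dict.mk doc).get? k).getD none))
          = fun k : String => k := rfl
      rw [hid]
      simpa using PySem.List.nodup_dedup (cols.filter (fun k => (PySem.Dict.mk doc).contains k))
    have hof := PySem.Dict.items_foldl_insert_fresh
      ((PySem.List.dedup (cols.filter (fun k => (PySem.Dict.mk doc).contains k))).map
        (fun k => (k, ((PySem.Dict.mk doc).get? k).getD none)))
      Prod.fst Prod.snd PySem.Dict.empty hfresh hkeys2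
    simpa using hof
  rw [hA, hB]

-- ===== VERDICT (by name: the statement is the Claim_ definition above) =====
theorem process_documentation_spec : Claim_equal_process_documentation := by
  intro documentation doc_columns _ hpre
  unfold Spec_process_documentation process_documentation process_documentation_alt
  have hmap : ∀ cols : List String,
      documentation.map (fun doc => pvRowA cols doc)
      = documentation.map (fun doc => pvRowB (pvPos cols) doc) := by
    intro cols
    exact List.map_congr_left (fun doc hd => pvRow_eq cols doc (hpre doc hd))
  cases doc_columns with
  | none => simpa using hmap pvDefaultColumns
  | some l =>
    cases l with
    | nil => simpa using hmap pvDefaultColumns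
    | cons c cs => simpa using hmap (c :: cs)
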